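-- pv_equiv track=rewrite | github.com/gabriele-dominici/SHARCS | src/data_utils.py | retrieve_aux
-- ===== SOURCE A (Python) =====
-- def retrieve_aux(images, questions, answers):
--     images_aux = []
--     questions_aux = []
--
--     for idx, img, q, y in zip(list(range(len(images))), images, questions, answers):
--         check_image = False
--         check_text = False
--         if y == 1:
--             questions_aux += [q]
--             check_text = True
--             images_aux += [img]
--             check_image = True
--         for j in (list(range(len(images)))[idx+1:]+list(range(len(images)))[:idx+1]):
--             if q == questions[j] and answers[j] == 1 and not check_image:
--                 images_aux += [images[j]]
--                 check_image = True
--             if (img == images[j] and answers[j] == 1) and not check_text: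
--                 questions_aux += [questions[j]]
--                 check_text = True
--             if check_image and check_text:
--                 break
--         if not check_image:
--             images_aux += [-1]
--         elif not check_text:
--             questions_aux += ['none']
--
--     return images_aux, questions_aux
-- ===== SOURCE B (Python) =====
-- def retrieve_aux(images, questions, answers):
--     n = len(images)
--     # index answer-1 samples: key -> increasing list of indices
--     by_q = {}
--     by_img = {}
--     for j in range(n):
--         if answers[j] == 1:
--             by_q.setdefault(questions[j], []).append(j)
--             by_img.setdefault(images[j], []).append(j)
--
--     def pick(lst, idx):
--         # first element of the sorted list strictly greater than idx,
--         # wrapping to the first element if there is none (binary search)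
--         lo, hi = 0, len(lst)
--         while lo < hi:
--             mid = (lo + hi) // 2
--             if lst[mid] <= idx:
--                 lo = mid + 1
--             else:
--                 hi = mid
--         return lst[lo] if lo < len(lst) else lst[0]
--
--     images_aux = []
--     questions_aux = []
--     for idx in range(n):
--         if answers[idx] == 1:
--             questions_aux.append(questions[idx])
--             images_aux.append(images[idx])
--         else:
--             qs = by_q.get(questions[idx], [])
--             js = by_img.get(images[idx], [])
--             if qs:
--                 images_aux.append(images[pick(qs, idx)])
--             else:
--                 images_aux.append(-1)
--             if js:
--                 questions_aux.append(questions[pick(js, idx)])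
--             elif qs:
--                 questions_aux.append('none')
--     return images_aux, questions_aux
-- ===== Notes on version B (the rewrite author's own statement) =====
-- stated objective: faster
-- what changed: Replaces A's per-element cyclic O(n) scan with two hash indexes (question->indices, image->indices with answer==1, built in one pass in increasing order) and a binary search for the first index after idx, wrapping to the first bucket element.
-- outside the precondition, e.g. on retrieve_aux([1], [], []): A returns ([], []), B raises IndexError; on retrieve_aux([1, 2], ['a', 'b'], [0]): A returns ([-1], []), B raises IndexError
import Mathlib
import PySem

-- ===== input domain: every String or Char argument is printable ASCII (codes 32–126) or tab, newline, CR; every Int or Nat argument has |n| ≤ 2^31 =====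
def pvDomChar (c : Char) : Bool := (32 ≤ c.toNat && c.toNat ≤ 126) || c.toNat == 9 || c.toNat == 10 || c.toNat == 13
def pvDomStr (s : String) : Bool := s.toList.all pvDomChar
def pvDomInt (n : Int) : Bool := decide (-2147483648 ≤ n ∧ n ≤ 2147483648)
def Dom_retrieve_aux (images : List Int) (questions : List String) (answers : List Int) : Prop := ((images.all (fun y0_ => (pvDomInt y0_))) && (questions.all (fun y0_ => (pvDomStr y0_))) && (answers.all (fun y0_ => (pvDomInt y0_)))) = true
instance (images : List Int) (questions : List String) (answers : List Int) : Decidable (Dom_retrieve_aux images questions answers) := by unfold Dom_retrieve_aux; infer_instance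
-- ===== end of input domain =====

-- B replaces A's per-element cyclic scan by two answer==1 hash indexes plus a binary
-- search for the first index after idx (objective: faster; measured on the timing inputs).
-- Pre_ excludes length-mismatched argument lists, on which A raises IndexError except
-- for a few degenerate truncations where zip silently drops elements.


-- ===== PORT A =====
-- list(range(n))[idx+1:] + list(range(n))[:idx+1]  (nonnegative slice bounds = drop/take)
def pvCycA (n idx : Nat) : List Nat :=
  (List.range n).drop (idx + 1) ++ (List.range n).take (idx + 1)

-- A's inner `for j in …` loop with its two flags, two accumulators and the break
def pvInnerA (images : List Int) (questions : List String) (answers : List Int)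
    (q : String) (img : Int) :
    List Nat → Bool → Bool → List Int → List String → Bool × Bool × List Int × List String
  | [], ci, ct, ia, qa => (ci, ct, ia, qa)
  | j :: js, ci, ct, ia, qa =>
    let hitI := q == questions.getD j "" && answers.getD j 0 == 1 && !ci
    let ia' := if hitI then ia ++ [images.getD j 0] else ia
    let ci' := if hitI then true else ci
    let hitT := img == images.getD j 0 && answers.getD j 0 == 1 && !ct
    let qa' := if hitT then qa ++ [questions.getD j ""] else qa
    let ct' := if hitT then true else ct
    if ci' && ct' then (ci', ct', ia', qa')
    else pvInnerA images questions answers q img js ci' ct' ia' qa'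

-- A's outer loop over the zipped quadruples
def pvOuterA (images : List Int) (questions : List String) (answers : List Int) (n : Nat) :
    List (Nat × Int × String × Int) → List Int → List String → List Int × List String
  | [], ia, qa => (ia, qa)
  | (idx, img, q, y) :: rest, ia, qa =>
    let qa0 := if y == 1 then qa ++ [q] else qa
    let ia0 := if y == 1 then ia ++ [img] else ia
    let ci0 := y == 1
    let ct0 := y == 1
    let r := pvInnerA images questions answers q img (pvCycA n idx) ci0 ct0 ia0 qa0
    let ia1 := if !r.1 then r.2.2.1 ++ [-1] else r.2.2.1
    let qa1 := if r.1 && !r.2.1 then r.2.2.2 ++ ["none"] else r.2.2.2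
    pvOuterA images questions answers n rest ia1 qa1

def retrieve_aux (images : List Int) (questions : List String) (answers : List Int) :
    List Int × List String :=
  pvOuterA images questions answers images.length
    (((List.range images.length).zip (images.zip (questions.zip answers))).map
      (fun x => (x.1, x.2.1, x.2.2.1, x.2.2.2))) [] []

-- ===== PORT B =====
-- one pass building both answer==1 indexes (setdefault(k, []).append(j) = modify k [] (· ++ [j]))
def pvBuildB (images : List Int) (questions : List String) (answers : List Int) (n : Nat) :
    PySem.Dict String (List Int) × PySem.Dict Int (List Int) :=
  (List.range n).foldl
    (fun d j =>
      if answers.getD j 0 == 1 then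
        (d.1.modify (questions.getD j "") [] (· ++ [(j : Int)]),
         d.2.modify (images.getD j 0) [] (· ++ [(j : Int)]))
      else d)
    (PySem.Dict.empty, PySem.Dict.empty)

-- Source B's hand-written binary search IS bisect_right; ported as PySem.List.bisectRight (same loop)
def pvPick (lst : List Int) (idx : Nat) : Int :=
  let lo := PySem.List.bisectRight lst (idx : Int)
  if lo < lst.length then lst.getD lo 0 else lst.getD 0 0

def pvOuterB (images : List Int) (questions : List String) (answers : List Int)
    (byq : PySem.Dict String (List Int)) (byimg : PySem.Dict Int (List Int)) :
    List Nat → List Int → List String → List Int × List String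
  | [], ia, qa => (ia, qa)
  | idx :: rest, ia, qa =>
    if answers.getD idx 0 == 1 then
      pvOuterB images questions answers byq byimg rest
        (ia ++ [images.getD idx 0]) (qa ++ [questions.getD idx ""])
    else
      let qs := byq.getD (questions.getD idx "") []
      let js := byimg.getD (images.getD idx 0) []
      let ia' := if qs ≠ [] then ia ++ [PySem.List.pyGetD images (pvPick qs idx) 0]
                 else ia ++ [-1]
      let qa' := if js ≠ [] then qa ++ [PySem.List.pyGetD questions (pvPick js idx) ""]
                 else if qs ≠ [] then qa ++ ["none"] else qa
      pvOuterB images questions answers byq byimg rest ia' qa'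

def retrieve_aux_alt (images : List Int) (questions : List String) (answers : List Int) :
    List Int × List String :=
  pvOuterB images questions answers
    (pvBuildB images questions answers images.length).1
    (pvBuildB images questions answers images.length).2 (List.range images.length) [] []

-- ===== PRECONDITION & SPEC =====
-- Pre_ excludes length-mismatched argument lists, on which A raises IndexError except for a
-- few degenerate truncations where zip silently drops elements (there B raises; see cites).
def Pre_retrieve_aux (images : List Int) (questions : List String) (answers : List Int) : Prop :=
  images.length ≤ questions.length ∧ images.length ≤ answers.length

instance (images : List Int) (questions : List String) (answers : List Int) :
    Decidable (Pre_retrieve_aux images questions answers) := by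
  unfold Pre_retrieve_aux; infer_instance

def pvWitness_retrieve_aux : List Int × List String × List Int :=
  ([7, 7, 3], ["a", "b", "a"], [1, 0, 0])

def Spec_retrieve_aux (images : List Int) (questions : List String) (answers : List Int)
    (out : List Int × List String) : Prop := out = retrieve_aux_alt images questions answers

instance (images : List Int) (questions : List String) (answers : List Int)
    (out : List Int × List String) : Decidable (Spec_retrieve_aux images questions answers out) := by
  unfold Spec_retrieve_aux; infer_instance

-- ===== CLAIM (what is proved, stated in full; the proofs are below) =====
def Claim_equal_retrieve_aux : Prop := ∀ (images : List Int) (questions : List String) (answers : List Int), Dom_retrieve_aux images questions answers → Pre_retrieve_aux images questions answers → Spec_retrieve_aux images questions answers (retrieve_aux images questions answers)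

-- ===== LEMMAS AND PROOFS =====

-- find? returns l[r] when the prefix fails the predicate and l[r] satisfies it
theorem pv_find?_first {α : Type} (p : α → Bool) :
    ∀ (l : List α) (r : Nat) (hr : r < l.length),
      (∀ i (h : i < l.length), i < r → p l[i] = false) → p l[r] = true →
      l.find? p = some l[r] := by
  intro l
  induction l with
  | nil => intro r hr; simp at hr
  | cons x xs ih =>
    intro r hr hpre hp
    cases r with
    | zero =>
      have hx : p x = true := by simpa using hp
      simp [List.find?, hx]
    | succ r =>
      have hx : p x = false := hpre 0 (by simp) (by omega)
      simp only [List.find?, hx]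
      exact ih r (by simpa using hr) (fun i h hi => hpre (i+1) (by simpa using h) (by omega)) hp

-- the inner loop with both flags set returns immediately
theorem pv_inner_tt (images : List Int) (questions : List String) (answers : List Int)
    (q : String) (img : Int) (js : List Nat) (ia : List Int) (qa : List String) :
    pvInnerA images questions answers q img js true true ia qa = (true, true, ia, qa) := by
  cases js <;> simp [pvInnerA]

-- the inner loop with only the image found: a pure text search
theorem pv_inner_tf (images : List Int) (questions : List String) (answers : List Int)
    (q : String) (img : Int) :
    ∀ (js : List Nat) (ia : List Int) (qa : List String),
      pvInnerA images questions answers q img js true false ia qa =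
        (true, (js.find? (fun j => img == images.getD j 0 && answers.getD j 0 == 1)).isSome, ia,
         qa ++ ((js.find? (fun j => img == images.getD j 0 && answers.getD j 0 == 1)).map
           (fun j => questions.getD j "")).toList) := by
  intro js
  induction js with
  | nil => simp [pvInnerA]
  | cons j js ih =>
    intro ia qa
    cases hb : (img == images.getD j 0 && answers.getD j 0 == 1) with
    | true =>
      simp only [pvInnerA, Bool.not_true, Bool.not_false, Bool.and_false, Bool.and_true, hb]
      rw [List.find?_cons_of_pos (a := j) (l := js) (p := fun j => img == images.getD j 0 && answers.getD j 0 == 1) hb]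
      simp
    | false =>
      simp only [pvInnerA, Bool.not_true, Bool.not_false, Bool.and_false, Bool.and_true, hb]
      rw [List.find?_cons_of_neg (a := j) (l := js) (p := fun j => img == images.getD j 0 && answers.getD j 0 == 1)
        (by intro hc; exact Bool.false_ne_true (hb.symm.trans hc))]
      simp only [Bool.false_eq_true, if_false, Bool.and_false]
      exact ih ia qa

-- the inner loop with only the text found: a pure image search
theorem pv_inner_ft (images : List Int) (questions : List String) (answers : List Int)
    (q : String) (img : Int) :
    ∀ (js : List Nat) (ia : List Int) (qa : List String),
      pvInnerA images questions answers q img js false true ia qa =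
        ((js.find? (fun j => q == questions.getD j "" && answers.getD j 0 == 1)).isSome, true,
         ia ++ ((js.find? (fun j => q == questions.getD j "" && answers.getD j 0 == 1)).map
           (fun j => images.getD j 0)).toList, qa) := by
  intro js
  induction js with
  | nil => simp [pvInnerA]
  | cons j js ih =>
    intro ia qa
    cases hb : (q == questions.getD j "" && answers.getD j 0 == 1) with
    | true =>
      simp only [pvInnerA, Bool.not_true, Bool.not_false, Bool.and_false, Bool.and_true, hb]
      rw [List.find?_cons_of_pos (a := j) (l := js) (p := fun j => q == questions.getD j "" && answers.getD j 0 == 1) hb]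
      simp
    | false =>
      simp only [pvInnerA, Bool.not_true, Bool.not_false, Bool.and_false, Bool.and_true, hb]
      rw [List.find?_cons_of_neg (a := j) (l := js) (p := fun j => q == questions.getD j "" && answers.getD j 0 == 1)
        (by intro hc; exact Bool.false_ne_true (hb.symm.trans hc))]
      simp only [Bool.false_eq_true, if_false, Bool.and_false, Bool.false_and]
      exact ih ia qa

-- the inner loop from a cold start: two independent first-match searches
theorem pv_inner_ff (images : List Int) (questions : List String) (answers : List Int)
    (q : String) (img : Int) :
    ∀ (js : List Nat) (ia : List Int) (qa : List String),
      pvInnerA images questions answers q img js false false ia qa =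
        ((js.find? (fun j => q == questions.getD j "" && answers.getD j 0 == 1)).isSome,
         (js.find? (fun j => img == images.getD j 0 && answers.getD j 0 == 1)).isSome,
         ia ++ ((js.find? (fun j => q == questions.getD j "" && answers.getD j 0 == 1)).map
           (fun j => images.getD j 0)).toList,
         qa ++ ((js.find? (fun j => img == images.getD j 0 && answers.getD j 0 == 1)).map
           (fun j => questions.getD j "")).toList) := by
  intro js
  induction js with
  | nil => simp [pvInnerA]
  | cons j js ih =>
    intro ia qa
    cases hbI : (q == questions.getD j "" && answers.getD j 0 == 1) with
    | true =>
      cases hbT : (img == images.getD j 0 && answers.getD j 0 == 1) with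
      | true =>
        simp only [pvInnerA, Bool.not_true, Bool.not_false, Bool.and_false, Bool.and_true,
          hbI, hbT]
        rw [List.find?_cons_of_pos (a := j) (l := js) (p := fun j => q == questions.getD j "" && answers.getD j 0 == 1) hbI,
          List.find?_cons_of_pos (a := j) (l := js) (p := fun j => img == images.getD j 0 && answers.getD j 0 == 1) hbT]
        simp
      | false =>
        simp only [pvInnerA, Bool.not_true, Bool.not_false, Bool.and_false, Bool.and_true,
          hbI, hbT]
        rw [List.find?_cons_of_pos (a := j) (l := js) (p := fun j => q == questions.getD j "" && answers.getD j 0 == 1) hbI,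
          List.find?_cons_of_neg (a := j) (l := js) (p := fun j => img == images.getD j 0 && answers.getD j 0 == 1)
            (by intro hc; exact Bool.false_ne_true (hbT.symm.trans hc))]
        simp [pv_inner_tf]
    | false =>
      cases hbT : (img == images.getD j 0 && answers.getD j 0 == 1) with
      | true =>
        simp only [pvInnerA, Bool.not_true, Bool.not_false, Bool.and_false, Bool.and_true,
          hbI, hbT]
        rw [List.find?_cons_of_neg (a := j) (l := js) (p := fun j => q == questions.getD j "" && answers.getD j 0 == 1)
            (by intro hc; exact Bool.false_ne_true (hbI.symm.trans hc)),
          List.find?_cons_of_pos (a := j) (l := js) (p := fun j => img == images.getD j 0 && answers.getD j 0 == 1) hbT]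
        simp [pv_inner_ft]
      | false =>
        simp only [pvInnerA, Bool.not_true, Bool.not_false, Bool.and_false, Bool.and_true,
          hbI, hbT]
        rw [List.find?_cons_of_neg (a := j) (l := js) (p := fun j => q == questions.getD j "" && answers.getD j 0 == 1)
            (by intro hc; exact Bool.false_ne_true (hbI.symm.trans hc)),
          List.find?_cons_of_neg (a := j) (l := js) (p := fun j => img == images.getD j 0 && answers.getD j 0 == 1)
            (by intro hc; exact Bool.false_ne_true (hbT.symm.trans hc))]
        simp only [Bool.false_eq_true, if_false, Bool.and_false, Bool.false_and]
        exact ih ia qa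

-- first match over A's wrapped index list = first filtered index after idx, else the first one
theorem pv_cyc_find? (p : Nat → Bool) (n idx : Nat) (hidx : idx < n) :
    (pvCycA n idx).find? p =
      (((List.range n).filter p).find? (fun j => decide (idx < j))).or
        ((List.range n).filter p).head? := by
  have htake : ∀ j ∈ (List.range n).take (idx + 1), j ≤ idx := by
    intro j hj
    rw [List.take_range] at hj
    have := List.mem_range.mp hj
    omega
  have hdrop : ∀ j ∈ (List.range n).drop (idx + 1), idx < j := by
    intro j hj
    rcases List.mem_iff_getElem.mp hj with ⟨i, hi, rfl⟩
    simp only [List.getElem_drop, List.getElem_range]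
    omega
  have hLd : ((List.range n).filter p).filter (fun j => decide (idx < j)) =
      ((List.range n).drop (idx + 1)).filter p := by
    conv_lhs => rw [← List.take_append_drop (idx + 1) (List.range n)]
    rw [List.filter_append, List.filter_append, List.filter_filter, List.filter_filter]
    have h1 : ((List.range n).take (idx + 1)).filter
        (fun a => decide (idx < a) && p a) = [] := by
      rw [List.filter_eq_nil_iff]
      intro a ha
      have := htake a ha
      simp only [Bool.and_eq_true, decide_eq_true_eq]
      omega
    have h2 : ((List.range n).drop (idx + 1)).filter
        (fun a => decide (idx < a) && p a) = ((List.range n).drop (idx + 1)).filter p := by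
      apply List.filter_congr
      intro a ha
      have := hdrop a ha
      simp [this]
    rw [h1, h2, List.nil_append]
  have hfd : ((List.range n).drop (idx + 1)).find? p =
      ((List.range n).filter p).find? (fun j => decide (idx < j)) := by
    rw [← List.head?_filter, ← List.head?_filter, hLd]
  have hcyc : (pvCycA n idx).find? p =
      (((List.range n).filter p).find? (fun j => decide (idx < j))).or
        (((List.range n).take (idx + 1)).find? p) := by
    rw [pvCycA, List.find?_append, hfd]
  rw [hcyc]
  cases hfind : ((List.range n).filter p).find? (fun j => decide (idx < j)) with
  | some j => simp
  | none =>
    simp only [Option.or, Option.none_or]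
    have hgt : ((List.range n).filter p).filter (fun j => decide (idx < j)) = [] := by
      rw [List.filter_eq_nil_iff]
      intro a ha
      have := List.find?_eq_none.mp hfind a ha
      simpa using this
    have hdropnil : ((List.range n).drop (idx + 1)).filter p = [] := by
      rw [← hLd]; exact hgt
    have hsplitL : (List.range n).filter p = ((List.range n).take (idx + 1)).filter p := by
      conv_lhs => rw [← List.take_append_drop (idx + 1) (List.range n)]
      rw [List.filter_append, hdropnil, List.append_nil]
    rw [hsplitL, List.head?_filter]

-- bisect-and-wrap = first element greater than idx, else the head
theorem pv_pick_eq (L : List Nat) (idx : Nat) (hs : L.Pairwise (· < ·)) (hne : L ≠ []) :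
    ∃ jstar : Nat,
      (L.find? (fun j => decide (idx < j))).or L.head? = some jstar ∧
      pvPick (L.map (fun j : Nat => (j : Int))) idx = (jstar : Int) := by
  have hsorted : (L.map (fun j : Nat => (j : Int))).Pairwise (· ≤ ·) :=
    List.Pairwise.map _ (fun a b hab => by exact_mod_cast Nat.le_of_lt hab) hs
  obtain ⟨h1, h2, h3⟩ := PySem.List.bisectRight_spec (L.map (fun j : Nat => (j : Int))) idx hsorted
  have hlen : (L.map (fun j : Nat => (j : Int))).length = L.length := by simp
  have hpos : 0 < L.length := List.length_pos_iff.mpr hne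
  by_cases hrl : PySem.List.bisectRight (L.map (fun j : Nat => (j : Int))) (idx : Int) <
      (L.map (fun j : Nat => (j : Int))).length
  · have hrL : PySem.List.bisectRight (L.map (fun j : Nat => (j : Int))) (idx : Int) < L.length := by
      omega
    refine ⟨L[PySem.List.bisectRight (L.map (fun j : Nat => (j : Int))) (idx : Int)]'hrL, ?_, ?_⟩
    · rw [pv_find?_first (fun j => decide (idx < j)) L _ hrL ?_ ?_]
      · simp [Option.or]
      · intro i hi hilt
        have hmi := h2 i (by omega) hilt
        rw [List.getElem_map] at hmi
        simp only [decide_eq_false_iff_not]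
        omega
      · have hmr := h3 _ hrl (le_refl _)
        rw [List.getElem_map] at hmr
        simp only [decide_eq_true_eq]
        omega
    · simp only [pvPick, hrl, if_true, List.getD_eq_getElem _ _ hrl, List.getElem_map]
  · have hr : PySem.List.bisectRight (L.map (fun j : Nat => (j : Int))) (idx : Int) =
        (L.map (fun j : Nat => (j : Int))).length := by omega
    have hnone : L.find? (fun j => decide (idx < j)) = none := by
      rw [List.find?_eq_none]
      intro x hx
      rcases List.mem_iff_getElem.mp hx with ⟨i, hi, rfl⟩
      have hmi := h2 i (by omega) (by omega)
      rw [List.getElem_map] at hmi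
      simp only [decide_eq_true_eq]
      omega
    refine ⟨L[0]'hpos, ?_, ?_⟩
    · rw [hnone]
      simp [Option.or, List.head?_eq_getElem?, List.getElem?_eq_getElem hpos]
    · have h0 : 0 < (L.map (fun j : Nat => (j : Int))).length := by omega
      simp only [pvPick, hrl, if_false, List.getD_eq_getElem _ _ h0, List.getElem_map]

-- the conditional two-dictionary fold is two modify-folds over the filtered pair lists
theorem pv_build_eq (images : List Int) (questions : List String) (answers : List Int) :
    ∀ (l : List Nat) (dq : PySem.Dict String (List Int)) (di : PySem.Dict Int (List Int)),
      l.foldl (fun d j =>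
          if answers.getD j 0 == 1 then
            (d.1.modify (questions.getD j "") [] (· ++ [(j : Int)]),
             d.2.modify (images.getD j 0) [] (· ++ [(j : Int)]))
          else d) (dq, di) =
      (((l.filter (fun j => answers.getD j 0 == 1)).map
          (fun j => (questions.getD j "", (j : Int)))).foldl
          (fun d p => d.modify p.1 [] (· ++ [p.2])) dq,
       ((l.filter (fun j => answers.getD j 0 == 1)).map
          (fun j => (images.getD j 0, (j : Int)))).foldl
          (fun d p => d.modify p.1 [] (· ++ [p.2])) di) := by
  intro l
  induction l with
  | nil => intro dq di; simp
  | cons j l ih =>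
    intro dq di
    cases hb : (answers.getD j 0 == 1) with
    | true =>
      rw [List.filter_cons_of_pos (p := fun j => answers.getD j 0 == 1) hb]
      simp only [List.foldl_cons, List.map_cons, hb, if_true]
      exact ih _ _
    | false =>
      rw [List.filter_cons_of_neg (p := fun j => answers.getD j 0 == 1)
        (by intro hc; exact Bool.false_ne_true (hb.symm.trans hc))]
      simp only [List.foldl_cons, hb, Bool.false_eq_true, if_false]
      exact ih _ _

-- the question bucket is the increasing list of answer==1 indices with that question
theorem pv_build_fst (images : List Int) (questions : List String) (answers : List Int)
    (n : Nat) (k : String) :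
    (pvBuildB images questions answers n).1.getD k [] =
      (((List.range n).filter (fun j => answers.getD j 0 == 1)).filter
        (fun j => questions.getD j "" == k)).map (fun j : Nat => (j : Int)) := by
  unfold pvBuildB
  rw [pv_build_eq]
  rw [PySem.Dict.getD_foldl_modify_append]
  rw [PySem.Dict.getD_empty, List.nil_append, List.filter_map, List.map_map]
  rfl

-- the image bucket likewise
theorem pv_build_snd (images : List Int) (questions : List String) (answers : List Int)
    (n : Nat) (k : Int) :
    (pvBuildB images questions answers n).2.getD k [] =
      (((List.range n).filter (fun j => answers.getD j 0 == 1)).filter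
        (fun j => images.getD j 0 == k)).map (fun j : Nat => (j : Int)) := by
  unfold pvBuildB
  rw [pv_build_eq]
  rw [PySem.Dict.getD_foldl_modify_append]
  rw [PySem.Dict.getD_empty, List.nil_append, List.filter_map, List.map_map]
  rfl

-- A's zipped quadruple list is the index map under Pre_
theorem pv_zip_eq (images : List Int) (questions : List String) (answers : List Int)
    (hq : images.length ≤ questions.length) (ha : images.length ≤ answers.length) :
    ((List.range images.length).zip (images.zip (questions.zip answers))).map
        (fun x => (x.1, x.2.1, x.2.2.1, x.2.2.2)) =
      (List.range images.length).map
        (fun i => (i, images.getD i 0, questions.getD i "", answers.getD i 0)) := by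
  apply List.ext_getElem
  · simp; omega
  · intro i h1 h2
    have hiN : i < images.length := by simp at h2; omega
    have hiq : i < questions.length := by omega
    have hia : i < answers.length := by omega
    simp [List.getElem_zip, List.getD_eq_getElem, hiN, hiq, hia]

-- the two outer loops agree step by step
theorem pv_outer_eq (images : List Int) (questions : List String) (answers : List Int) :
    ∀ (idxs : List Nat), (∀ i ∈ idxs, i < images.length) →
      ∀ (ia : List Int) (qa : List String),
      pvOuterA images questions answers images.length
        (idxs.map (fun i => (i, images.getD i 0, questions.getD i "", answers.getD i 0))) ia qa =
      pvOuterB images questions answers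
        (pvBuildB images questions answers images.length).1
        (pvBuildB images questions answers images.length).2 idxs ia qa := by
  intro idxs
  induction idxs with
  | nil => intro _ ia qa; rfl
  | cons idx rest ih =>
    intro hmem ia qa
    have hidx : idx < images.length := hmem idx List.mem_cons_self
    have hrest : ∀ i ∈ rest, i < images.length := fun i hi => hmem i (List.mem_cons_of_mem _ hi)
    simp only [List.map_cons]
    cases hy : (answers.getD idx 0 == 1) with
    | true =>
      simp only [pvOuterA, pvOuterB, hy, if_true, pv_inner_tt, Bool.not_true,
        Bool.and_false, Bool.false_eq_true, if_false]
      exact ih hrest _ _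
    | false =>
      simp only [pvOuterA, pvOuterB, hy, Bool.false_eq_true, if_false]
      rw [pv_inner_ff]
      have hpredI : (fun j => questions.getD idx "" == questions.getD j "" &&
            answers.getD j 0 == 1)
          = (fun j => questions.getD j "" == questions.getD idx "" &&
            answers.getD j 0 == 1) := by
        funext j; rw [Bool.beq_comm]
      have hpredT : (fun j => images.getD idx 0 == images.getD j 0 && answers.getD j 0 == 1)
          = (fun j => images.getD j 0 == images.getD idx 0 && answers.getD j 0 == 1) := by
        funext j; rw [Bool.beq_comm]
      rw [hpredI, hpredT, pv_cyc_find? _ _ idx hidx, pv_cyc_find? _ _ idx hidx]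
      have hqs : (pvBuildB images questions answers images.length).1.getD
            (questions.getD idx "") [] =
          ((List.range images.length).filter (fun j => questions.getD j "" ==
            questions.getD idx "" && answers.getD j 0 == 1)).map (fun j : Nat => (j : Int)) := by
        rw [pv_build_fst, List.filter_filter]
      have hjs : (pvBuildB images questions answers images.length).2.getD
            (images.getD idx 0) [] =
          ((List.range images.length).filter (fun j => images.getD j 0 ==
            images.getD idx 0 && answers.getD j 0 == 1)).map (fun j : Nat => (j : Int)) := by
        rw [pv_build_snd, List.filter_filter]
      rw [hqs, hjs]
      have hsortQ : ((List.range images.length).filter (fun j => questions.getD j "" ==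
            questions.getD idx "" && answers.getD j 0 == 1)).Pairwise (· < ·) :=
        List.Pairwise.filter _ List.pairwise_lt_range
      have hsortT : ((List.range images.length).filter (fun j => images.getD j 0 ==
            images.getD idx 0 && answers.getD j 0 == 1)).Pairwise (· < ·) :=
        List.Pairwise.filter _ List.pairwise_lt_range
      cases hLq : (List.range images.length).filter (fun j => questions.getD j "" ==
          questions.getD idx "" && answers.getD j 0 == 1) with
      | nil =>
        cases hLi : (List.range images.length).filter (fun j => images.getD j 0 ==
            images.getD idx 0 && answers.getD j 0 == 1) with
        | nil =>
          simp only [hLq, hLi, List.map_nil, List.find?_nil, Option.or, List.head?_nil,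
            Option.isSome_none, Option.map_none, Option.toList_none, List.append_nil,
            Bool.not_false, Bool.and_false, Bool.false_and, Bool.false_eq_true, if_false,
            Bool.not_true, ne_eq, not_true_eq_false, if_true, if_neg,
            not_false_eq_true]
          exact ih hrest _ _
        | cons t ts =>
          obtain ⟨jt, hjt, hpickt⟩ := pv_pick_eq (t :: ts) idx (hLi ▸ hsortT) (by simp)
          simp only [hLq, hLi, List.map_nil, List.find?_nil, Option.or, List.head?_nil,
            Option.isSome_none, Option.map_none, Option.toList_none, List.append_nil] at *
          rw [hjt]
          simp only [Option.isSome_some, Option.map_some, Option.toList_some,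
            Bool.not_false, Bool.and_true, Bool.false_and, Bool.false_eq_true, if_false,
            hpickt, PySem.List.pyGetD_natCast]
          simp only [ne_eq, reduceCtorEq, not_false_eq_true, if_true, List.map_cons,
            reduceIte]
          exact ih hrest _ _
      | cons h hs2 =>
        obtain ⟨jq, hjq, hpickq⟩ := pv_pick_eq (h :: hs2) idx (hLq ▸ hsortQ) (by simp)
        cases hLi : (List.range images.length).filter (fun j => images.getD j 0 ==
            images.getD idx 0 && answers.getD j 0 == 1) with
        | nil =>
          simp only [hLq, hLi, List.map_nil, List.find?_nil, Option.or, List.head?_nil,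
            Option.isSome_none, Option.map_none, Option.toList_none, List.append_nil] at *
          rw [hjq]
          simp only [Option.isSome_some, Option.map_some, Option.toList_some,
            Bool.not_false, Bool.and_true, Bool.true_and, hpickq, PySem.List.pyGetD_natCast,
            Bool.and_false, Bool.not_true]
          simp only [ne_eq, reduceCtorEq, not_false_eq_true, if_true, not_true_eq_false,
            if_false, List.map_cons, reduceIte]
          exact ih hrest _ _
        | cons t ts =>
          obtain ⟨jt, hjt, hpickt⟩ := pv_pick_eq (t :: ts) idx (hLi ▸ hsortT) (by simp)
          simp only [hLq, hLi] at *
          rw [hjq, hjt]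
          simp only [Option.isSome_some, Option.map_some, Option.toList_some,
            Bool.not_true, Bool.and_false, hpickq, hpickt, PySem.List.pyGetD_natCast,
            Bool.false_eq_true, if_false, Bool.and_true]
          simp only [ne_eq, reduceCtorEq, not_false_eq_true, if_true, List.map_cons,
            reduceIte]
          exact ih hrest _ _

-- ===== VERDICT (by name: the statement is the Claim_ definition above) =====
theorem retrieve_aux_spec : Claim_equal_retrieve_aux := by
  intro images questions answers _hdom hpre
  unfold Spec_retrieve_aux retrieve_aux retrieve_aux_alt
  rw [pv_zip_eq images questions answers hpre.1 hpre.2]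
  exact pv_outer_eq images questions answers (List.range images.length)
    (fun i hi => List.mem_range.mp hi) [] []
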